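-- pv_equiv track=rewrite | github.com/nautidpk/codeforce-problem-solving | givenLenandSum489C.py | maxLimitNo
-- ===== SOURCE A (Python) =====
-- def maxLimitNo(m,s):
--     if(m*9<s):
--         return "-1"
--     if(m>1 and s==0):
--         return "-1"
--     i=0;ans="";flag=True
--     while(i<m):
--         if(not flag):
--             i+=1
--             ans+="0"
--             continue
--         num=s-9
--         if(num>=0):
--             ans+="9"
--             s-=9
--         elif(num<0):
--             ans+=str(s)
--             flag=False
--         i+=1
--     return ans
-- ===== SOURCE B (Python) =====
-- def maxLimitNo(m, s):
--     # closed form: block of nines, one remainder digit, then zeros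
--     if m * 9 < s:
--         return "-1"
--     if m > 1 and s == 0:
--         return "-1"
--     nines, rem = divmod(s, 9)
--     if nines >= m:
--         return "9" * m
--     return "9" * nines + str(rem) + "0" * (m - nines - 1)
-- ===== Notes on version B (the rewrite author's own statement) =====
-- stated objective: simpler
-- what changed: Replaces the digit-by-digit while-loop with flag state by a closed-form computation of the three blocks (divmod(s,9) gives the count of nines, the remainder digit, and the zero padding), built with string repetition.
-- outside the precondition, e.g. on maxLimitNo(1, -5): A returns '-5', B returns '40'
import Mathlib
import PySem

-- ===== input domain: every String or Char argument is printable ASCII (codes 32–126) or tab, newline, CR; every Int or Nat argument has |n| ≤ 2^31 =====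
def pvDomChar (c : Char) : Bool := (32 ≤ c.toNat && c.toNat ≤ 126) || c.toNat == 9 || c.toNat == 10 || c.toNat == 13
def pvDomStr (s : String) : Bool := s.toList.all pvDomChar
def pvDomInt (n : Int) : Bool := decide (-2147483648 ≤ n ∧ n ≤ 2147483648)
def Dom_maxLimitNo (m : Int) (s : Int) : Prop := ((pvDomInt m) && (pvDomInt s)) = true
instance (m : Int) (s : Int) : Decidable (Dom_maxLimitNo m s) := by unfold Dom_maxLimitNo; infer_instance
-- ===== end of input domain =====

-- B replaces A's digit-by-digit while-loop (flag state) by a closed-form block computation via divmod(s,9); simpler, same results for nonnegative digit sums.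


-- ===== PORT A =====
-- the while-loop: state (i, s, ans, flag), one iteration per loop pass
def maxLimitNoLoop (m : Int) (i : Int) (s : Int) (ans : String) (flag : Bool) : String :=
  if h : i < m then
    if flag = false then
      maxLimitNoLoop m (i + 1) s (ans ++ "0") flag
    else
      let num := s - 9
      if num ≥ 0 then
        maxLimitNoLoop m (i + 1) (s - 9) (ans ++ "9") flag
      else
        maxLimitNoLoop m (i + 1) s (ans ++ PySem.Int.toStr s) false
  else ans
termination_by (m - i).toNat
decreasing_by all_goals omega

def maxLimitNo (m : Int) (s : Int) : String :=
  if m * 9 < s then "-1"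
  else if m > 1 ∧ s = 0 then "-1"
  else maxLimitNoLoop m 0 s "" true

-- ===== PORT B =====
def maxLimitNo_alt (m : Int) (s : Int) : String :=
  if m * 9 < s then "-1"
  else if m > 1 ∧ s = 0 then "-1"
  else
    let nines := PySem.Int.floordiv s 9
    let rem := PySem.Int.mod s 9
    if nines ≥ m then String.ofList (List.replicate m.toNat '9')
    else String.ofList (List.replicate nines.toNat '9') ++ PySem.Int.toStr rem
           ++ String.ofList (List.replicate (m - nines - 1).toNat '0')

-- ===== PRECONDITION & SPEC =====
-- Pre_ excludes negative digit sums s < 0 (outside the task's natural domain: a digit sum is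
-- nonnegative), on which A's loop emits str(s) itself, e.g. A(1,-5) = "-5" while B gives "40".
def Pre_maxLimitNo (m : Int) (s : Int) : Prop := 0 ≤ s
instance (m : Int) (s : Int) : Decidable (Pre_maxLimitNo m s) := by unfold Pre_maxLimitNo; infer_instance
def pvWitness_maxLimitNo : Int × Int := (3, 17)

def Spec_maxLimitNo (m : Int) (s : Int) (out : String) : Prop := out = maxLimitNo_alt m s
instance (m : Int) (s : Int) (out : String) : Decidable (Spec_maxLimitNo m s out) := by unfold Spec_maxLimitNo; infer_instance

-- ===== CLAIM (what is proved, stated in full; the proofs are below) =====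
def Claim_equal_maxLimitNo : Prop := ∀ (m : Int) (s : Int), Dom_maxLimitNo m s → Pre_maxLimitNo m s → Spec_maxLimitNo m s (maxLimitNo m s)

-- ===== LEMMAS AND PROOFS =====

-- closed form of the loop's output for a remaining window of k digits (proof-only helper)
def mlnCF (k : Nat) (s : Int) : String :=
  if 9 * (k : Int) ≤ s then String.ofList (List.replicate k '9')
  else String.ofList (List.replicate (PySem.Int.floordiv s 9).toNat '9')
         ++ PySem.Int.toStr (PySem.Int.mod s 9)
         ++ String.ofList (List.replicate (k - (PySem.Int.floordiv s 9).toNat - 1) '0')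

lemma mln_loop_false (k : Nat) : ∀ (m i s : Int) (ans : String), m - i = k →
    maxLimitNoLoop m i s ans false = ans ++ String.ofList (List.replicate k '0') := by
  induction k with
  | zero =>
    intro m i s ans h
    rw [maxLimitNoLoop]
    simp [show ¬ i < m by omega, ← String.toList_inj, String.toList_append]
  | succ k ih =>
    intro m i s ans h
    rw [maxLimitNoLoop]
    simp only [show i < m by omega, dif_pos, if_pos rfl]
    rw [ih m (i + 1) s (ans ++ "0") (by omega)]
    rw [← String.toList_inj]
    simp [String.toList_append, List.replicate_succ]

lemma mln_fdiv (s : Int) : PySem.Int.floordiv s 9 = s / 9 :=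
  PySem.Int.floordiv_eq_ediv_of_pos (by norm_num)

lemma mln_fmod (s : Int) : PySem.Int.mod s 9 = s % 9 :=
  PySem.Int.mod_eq_emod_of_pos (by norm_num)

lemma mln_loop_true (k : Nat) : ∀ (m i s : Int) (ans : String), m - i = k → 0 ≤ s → s ≤ 9 * k →
    maxLimitNoLoop m i s ans true = ans ++ mlnCF k s := by
  induction k with
  | zero =>
    intro m i s ans h hs0 hs9
    have hs : s = 0 := by omega
    subst hs
    rw [maxLimitNoLoop]
    rw [dif_neg (show ¬ i < m by omega), ← String.toList_inj]
    simp [mlnCF]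
  | succ k ih =>
    intro m i s ans h hs0 hs9
    rw [maxLimitNoLoop]
    simp only [show i < m by omega, dif_pos]
    have e1 : PySem.Int.floordiv s 9 = s / 9 := mln_fdiv s
    have e2 : PySem.Int.mod s 9 = s % 9 := mln_fmod s
    by_cases hge : s - 9 ≥ 0
    · rw [if_neg (show ¬ (true = false) by simp)]; simp only [if_pos hge]
      rw [ih m (i + 1) (s - 9) (ans ++ "9") (by omega) (by omega) (by push_cast; push_cast at hs9; omega)]
      have e1' : PySem.Int.floordiv (s - 9) 9 = (s - 9) / 9 := mln_fdiv (s - 9)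
      have e2' : PySem.Int.mod (s - 9) 9 = (s - 9) % 9 := mln_fmod (s - 9)
      rw [← String.toList_inj]
      simp only [mlnCF, e1, e2, e1', e2', String.toList_append, String.toList_ofList]
      split_ifs with hA hB hB
      · simp [List.replicate_succ]
      · push_cast at hA hB; omega
      · push_cast at hA hB; omega
      · push_cast at hA hB hs9
        have hc : (s / 9).toNat = ((s - 9) / 9).toNat + 1 := by omega
        have hm2 : s % 9 = (s - 9) % 9 := by omega
        have hz : (k + 1) - (s / 9).toNat - 1 = k - ((s - 9) / 9).toNat - 1 := by omega
        rw [hz, hm2, hc, List.replicate_succ]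
        simp
    · rw [if_neg (show ¬ (true = false) by simp)]; simp only [if_neg hge]
      rw [mln_loop_false k m (i + 1) s (ans ++ PySem.Int.toStr s) (by omega)]
      rw [← String.toList_inj]
      simp only [mlnCF, e1, e2, String.toList_append, String.toList_ofList]
      split_ifs with hA
      · push_cast at hA; omega
      · have hd : (s / 9).toNat = 0 := by omega
        have hm : s % 9 = s := by omega
        simp [hd, hm]

-- ===== VERDICT (by name: the statement is the Claim_ definition above) =====
theorem maxLimitNo_spec : Claim_equal_maxLimitNo := by
  intro m s _ hpre
  unfold Spec_maxLimitNo maxLimitNo maxLimitNo_alt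
  have hs0 : (0 : Int) ≤ s := hpre
  by_cases h1 : m * 9 < s
  · simp [h1]
  · simp only [if_neg h1]
    by_cases h2 : m > 1 ∧ s = 0
    · simp [h2]
    · simp only [if_neg h2]
      have hm0 : 0 ≤ m := by omega
      rw [mln_loop_true m.toNat m 0 s "" (by omega) hs0 (by omega)]
      have hdiv := mln_fdiv s
      by_cases hTop : PySem.Int.floordiv s 9 ≥ m
      · have h9 : 9 * ((m.toNat : Nat) : Int) ≤ s := by
          rw [hdiv] at hTop; omega
        rw [mlnCF, if_pos h9, if_pos hTop, ← String.toList_inj]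
        simp [String.toList_append]
      · have h9 : ¬ 9 * ((m.toNat : Nat) : Int) ≤ s := by
          rw [hdiv] at hTop; omega
        have hz : m.toNat - (PySem.Int.floordiv s 9).toNat - 1
            = (m - PySem.Int.floordiv s 9 - 1).toNat := by
          rw [hdiv] at hTop ⊢; omega
        rw [mlnCF, if_neg h9, if_neg hTop, hz, ← String.toList_inj]
        simp [String.toList_append]
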